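-- pv_equiv track=rewrite | github.com/Ertzyk/competitive-programming | codeforces/python/White-Black_Balanced_Subtrees.py | dfs
-- ===== SOURCE A (Python) =====
-- def dfs(tree, b_or_w, node):
--     x, s = 1 if b_or_w[node - 1] == 'W' else -1, 0
--     for i in tree[node]:
--         c, d = dfs(tree, b_or_w, i)
--         x += c
--         s += d
--     if x == 0:
--         s += 1
--     return x, s
-- ===== SOURCE B (Python) =====
-- def dfs(tree, b_or_w, node):
--     # iterative post-order with an explicit frame stack instead of recursion
--     def start(n):
--         return (n, tree[n], 1 if b_or_w[n - 1] == 'W' else -1, 0)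
--     stack = [start(node)]
--     while True:
--         n, cs, x, s = stack.pop()
--         if cs:
--             stack.append((n, cs[1:], x, s))
--             stack.append(start(cs[0]))
--         else:
--             if x == 0:
--                 s += 1
--             if not stack:
--                 return x, s
--             pn, pcs, px, ps = stack.pop()
--             stack.append((pn, pcs, px + x, ps + s))
-- ===== Notes on version B (the rewrite author's own statement) =====
-- stated objective: alternative
-- what changed: Replaces A's recursive DFS by an iterative explicit-stack post-order traversal: frames (node, remaining children, balance, count) are pushed/popped in a single while loop instead of recursive calls.
import Mathlib
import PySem

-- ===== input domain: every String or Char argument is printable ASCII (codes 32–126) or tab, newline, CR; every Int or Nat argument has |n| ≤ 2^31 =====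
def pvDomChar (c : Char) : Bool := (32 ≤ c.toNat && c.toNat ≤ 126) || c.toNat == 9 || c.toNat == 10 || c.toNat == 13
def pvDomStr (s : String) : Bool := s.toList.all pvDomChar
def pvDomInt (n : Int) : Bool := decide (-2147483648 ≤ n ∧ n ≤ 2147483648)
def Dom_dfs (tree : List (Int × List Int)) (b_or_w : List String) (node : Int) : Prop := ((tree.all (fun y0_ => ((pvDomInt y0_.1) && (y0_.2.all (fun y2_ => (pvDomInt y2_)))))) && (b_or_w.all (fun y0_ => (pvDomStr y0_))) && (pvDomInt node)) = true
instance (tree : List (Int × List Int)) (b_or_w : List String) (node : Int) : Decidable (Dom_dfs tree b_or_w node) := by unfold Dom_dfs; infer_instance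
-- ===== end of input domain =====

-- B replaces A's recursive DFS by an iterative explicit-stack post-order traversal (same cost);
-- return values proved equal on Pre_dfs (the inputs on which A's recursion is well-defined).

-- ===== PORT A =====
-- A recurses on a graph given as data, so the port carries a fuel counter as a totality guard;
-- under Pre_dfs the recursion depth is bounded by the number of distinct reachable keys, so
-- fuel tree.length + 1 is provably never exhausted.
def dfsF (tree : List (Int × List Int)) (b_or_w : List String) (fuel : Nat) (node : Int) : Int × Int :=
  match fuel with
  | 0 => (0, 0)  -- unreachable under Pre_dfs
  | fuel + 1 =>
    let x0 : Int := if PySem.List.pyGet? b_or_w (node - 1) = some "W" then 1 else -1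
    let cs : List Int := ((PySem.Dict.mk tree).get? node).getD []
    let r := cs.foldl (fun (acc : Int × Int) i =>
      let cd := dfsF tree b_or_w fuel i
      (acc.1 + cd.1, acc.2 + cd.2)) (x0, 0)
    (r.1, if r.1 = 0 then r.2 + 1 else r.2)

def dfs (tree : List (Int × List Int)) (b_or_w : List String) (node : Int) : Int × Int :=
  dfsF tree b_or_w (tree.length + 1) node

-- ===== PORT B =====
-- start(n) of Source B: a frame (node, remaining children, balance so far, count so far)
def pvStart (tree : List (Int × List Int)) (b_or_w : List String) (n : Int) : Int × List Int × Int × Int :=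
  (n, ((PySem.Dict.mk tree).get? n).getD [],
   if PySem.List.pyGet? b_or_w (n - 1) = some "W" then 1 else -1, 0)

-- the 'while True' loop of Source B; fuel is only a totality guard (none = the loop did not return);
-- pvFuel below provably suffices under Pre_dfs
def pvLoop (tree : List (Int × List Int)) (b_or_w : List String) (fuel : Nat)
    (stack : List (Int × List Int × Int × Int)) : Option (Int × Int) :=
  match fuel with
  | 0 => none
  | fuel + 1 =>
    match stack with
    | [] => none  -- unreachable: the loop returns before the stack empties
    | (n, cs, x, s) :: rest =>
      match cs with
      | c :: cs' => pvLoop tree b_or_w fuel (pvStart tree b_or_w c :: (n, cs', x, s) :: rest)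
      | [] =>
        let s : Int := if x = 0 then s + 1 else s
        match rest with
        | [] => some (x, s)
        | (pn, pcs, px, ps) :: rest' => pvLoop tree b_or_w fuel ((pn, pcs, px + x, ps + s) :: rest')

def pvFuel (tree : List (Int × List Int)) : Nat :=
  ((tree.map (fun p => p.2.length)).foldl max 0 + 2) ^ (tree.length + 2) + 1

def dfs_alt (tree : List (Int × List Int)) (b_or_w : List String) (node : Int) : Int × Int :=
  (pvLoop tree b_or_w (pvFuel tree) [pvStart tree b_or_w node]).getD (0, 0)

-- ===== PRECONDITION & SPEC =====
-- the children list of a key (empty for a non-key), the one-step expansion of a node set, and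
-- the set of nodes reachable from n (tree.length+1 expansion rounds compute the full closure,
-- since a reachable node is reached by a repetition-free path through keys)
def pvChildren (tree : List (Int × List Int)) (n : Int) : List Int :=
  ((PySem.Dict.mk tree).get? n).getD []

def pvExpand (tree : List (Int × List Int)) (S : List Int) : List Int :=
  (S ++ S.flatMap (pvChildren tree)).dedup

def pvReach (tree : List (Int × List Int)) (n : Int) : List Int :=
  (pvExpand tree)^[Nat.succ tree.length] [n]

-- Pre_dfs: every node reachable from `node` is a key of the dict (else A raises KeyError) with
-- a Python-valid colour index (its index is k minus one; validity means -len < k ≤ len, else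
-- IndexError), and no reachable node lies on a cycle (else A's recursion never terminates).
-- It excludes no input on which A returns.
def Pre_dfs (tree : List (Int × List Int)) (b_or_w : List String) (node : Int) : Prop :=
  ∀ k ∈ pvReach tree node,
    ((PySem.Dict.mk tree).get? k).isSome = true ∧
    (-(b_or_w.length : Int) < k ∧ k ≤ (b_or_w.length : Int)) ∧
    k ∉ (pvChildren tree k).flatMap (pvReach tree)
instance (tree : List (Int × List Int)) (b_or_w : List String) (node : Int) : Decidable (Pre_dfs tree b_or_w node) := by unfold Pre_dfs; infer_instance

def pvWitness_dfs : (List (Int × List Int)) × List String × Int := ([(1, [2]), (2, [])], ["W", "B"], 1)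

def Spec_dfs (tree : List (Int × List Int)) (b_or_w : List String) (node : Int) (out : Int × Int) : Prop := out = dfs_alt tree b_or_w node
instance (tree : List (Int × List Int)) (b_or_w : List String) (node : Int) (out : Int × Int) : Decidable (Spec_dfs tree b_or_w node out) := by unfold Spec_dfs; infer_instance

-- ===== CLAIM (what is proved, stated in full; the proofs are below) =====
def Claim_equal_dfs : Prop := ∀ (tree : List (Int × List Int)) (b_or_w : List String) (node : Int), Dom_dfs tree b_or_w node → Pre_dfs tree b_or_w node → Spec_dfs tree b_or_w node (dfs tree b_or_w node)

-- ===== LEMMAS AND PROOFS =====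

-- the number of distinct nodes reachable from n: the termination measure of A's recursion
def pvRank (tree : List (Int × List Int)) (n : Int) : Nat :=
  (pvReach tree n).toFinset.card

-- the value A computes at node n, with canonical fuel
def pvV (tree : List (Int × List Int)) (b_or_w : List String) (n : Int) : Int × Int :=
  dfsF tree b_or_w (pvRank tree n + 1) n

lemma pvMemExpand_left {tree : List (Int × List Int)} {S : List Int} {x : Int}
    (h : x ∈ S) : x ∈ pvExpand tree S := by
  simp only [pvExpand, List.mem_dedup, List.mem_append]
  exact Or.inl h

lemma pvMemExpand_child {tree : List (Int × List Int)} {S : List Int} {x c : Int}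
    (hx : x ∈ S) (hc : c ∈ pvChildren tree x) : c ∈ pvExpand tree S := by
  simp only [pvExpand, List.mem_dedup, List.mem_append, List.mem_flatMap]
  exact Or.inr ⟨x, hx, hc⟩

lemma pvExpand_mono {tree : List (Int × List Int)} {S T : List Int}
    (h : ∀ x ∈ S, x ∈ T) : ∀ y ∈ pvExpand tree S, y ∈ pvExpand tree T := by
  intro y hy
  simp only [pvExpand, List.mem_dedup, List.mem_append, List.mem_flatMap] at hy ⊢
  rcases hy with h1 | ⟨a, ha, hc⟩
  · exact Or.inl (h _ h1)
  · exact Or.inr ⟨a, h a ha, hc⟩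

lemma pvIter_infl {tree : List (Int × List Int)} {S : List Int} :
    ∀ k : Nat, ∀ x ∈ S, x ∈ (pvExpand tree)^[k] S := by
  intro k
  induction k with
  | zero => intro x hx; simpa using hx
  | succ k ih =>
    intro x hx
    rw [Function.iterate_succ_apply']
    exact pvMemExpand_left (ih x hx)

lemma pvIter_le {tree : List (Int × List Int)} {S : List Int} {j k : Nat} (h : j ≤ k) :
    ∀ x ∈ (pvExpand tree)^[j] S, x ∈ (pvExpand tree)^[k] S := by
  obtain ⟨d, rfl⟩ := Nat.exists_eq_add_of_le h
  intro x hx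
  rw [Nat.add_comm, Function.iterate_add_apply]
  exact pvIter_infl d x hx

lemma pvMem_reach_self (tree : List (Int × List Int)) (n : Int) : n ∈ pvReach tree n :=
  pvIter_infl _ n (by simp)

lemma pvReach_subset_of_closed {tree : List (Int × List Int)} {T : List Int} {x : Int}
    (hT : ∀ y ∈ pvExpand tree T, y ∈ T) (hx : x ∈ T) :
    ∀ y ∈ pvReach tree x, y ∈ T := by
  have key : ∀ k : Nat, ∀ y ∈ (pvExpand tree)^[k] [x], y ∈ T := by
    intro k
    induction k with
    | zero => intro y hy; simp at hy; subst hy; exact hx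
    | succ k ih =>
      intro y hy
      rw [Function.iterate_succ_apply'] at hy
      exact hT y (pvExpand_mono ih y hy)
  exact key _

-- pigeonhole: when every reachable node is a key, the closure stabilises within
-- tree.length + 1 rounds, so pvReach tree m is closed under one more expansion
lemma pvReach_closed (tree : List (Int × List Int)) (m : Int)
    (Hk : ∀ x ∈ pvReach tree m, x ∈ tree.map Prod.fst) :
    ∀ y ∈ pvExpand tree (pvReach tree m), y ∈ pvReach tree m := by
  have hsubK : ∀ k ≤ tree.length + 1,
      ((pvExpand tree)^[k] [m]).toFinset ⊆ (tree.map Prod.fst).toFinset := by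
    intro k hk x hx
    rw [List.mem_toFinset] at hx ⊢
    exact Hk x (pvIter_le hk x hx)
  have hkeycard : (tree.map Prod.fst).toFinset.card ≤ tree.length :=
    le_trans (List.toFinset_card_le _) (by simp)
  have hex : ∃ k < tree.length + 1,
      ((pvExpand tree)^[k] [m]).toFinset = ((pvExpand tree)^[k+1] [m]).toFinset := by
    by_contra hno
    push_neg at hno
    have grow : ∀ j ≤ tree.length + 1, j + 1 ≤ ((pvExpand tree)^[j] [m]).toFinset.card := by
      intro j
      induction j with
      | zero =>
        intro _
        have hm : m ∈ ((pvExpand tree)^[0] [m]).toFinset := by simp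
        exact Finset.card_pos.mpr ⟨m, hm⟩
      | succ j ih =>
        intro hj
        have h1 := ih (by omega)
        have hne := hno j (by omega)
        have hsub : ((pvExpand tree)^[j] [m]).toFinset ⊆ ((pvExpand tree)^[j+1] [m]).toFinset := by
          intro x hx
          rw [List.mem_toFinset] at hx ⊢
          exact pvIter_le (by omega) x hx
        have hss := Finset.ssubset_iff_subset_ne.mpr ⟨hsub, hne⟩
        have := Finset.card_lt_card hss
        omega
    have h1 := grow (tree.length + 1) le_rfl
    have h2 := Finset.card_le_card (hsubK (tree.length + 1) le_rfl)
    omega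
  obtain ⟨k, hk, hfix⟩ := hex
  have hfix' : ∀ x : Int, x ∈ (pvExpand tree)^[k] [m] ↔ x ∈ (pvExpand tree)^[k+1] [m] := by
    intro x
    rw [← List.mem_toFinset, ← List.mem_toFinset, hfix]
  have hprop : ∀ j : Nat, ∀ x : Int,
      x ∈ (pvExpand tree)^[k + j] [m] ↔ x ∈ (pvExpand tree)^[k] [m] := by
    intro j
    induction j with
    | zero => intro x; rfl
    | succ j ih =>
      intro x
      constructor
      · intro hx
        rw [show k + (j+1) = (k + j) + 1 from rfl, Function.iterate_succ_apply'] at hx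
        have h2 := pvExpand_mono (fun y hy => (ih y).mp hy) x hx
        have h3 : x ∈ (pvExpand tree)^[k+1] [m] := by
          rw [Function.iterate_succ_apply']
          exact h2
        exact (hfix' x).mpr h3
      · intro hx
        exact pvIter_le (by omega) x hx
  intro y hy
  have h2 : y ∈ (pvExpand tree)^[tree.length + 1 + 1] [m] := by
    rw [Function.iterate_succ_apply']
    exact hy
  have h3 : y ∈ (pvExpand tree)^[k] [m] := by
    rw [show tree.length + 1 + 1 = k + (tree.length + 2 - k) from by omega] at h2
    exact (hprop _ y).mp h2
  exact pvIter_le (by omega) y h3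

lemma pvMemKeys_of_isSome {tree : List (Int × List Int)} {c : Int}
    (h : ((PySem.Dict.mk tree).get? c).isSome = true) : c ∈ tree.map Prod.fst := by
  obtain ⟨cs, hcs⟩ := Option.isSome_iff_exists.mp h
  exact List.mem_map.mpr ⟨(c, cs), PySem.Dict.mem_items_of_get?_eq_some _ hcs, rfl⟩

lemma pvFoldlCongr (F G : Int → Int × Int) (cs : List Int) (h : ∀ c ∈ cs, F c = G c) :
    ∀ a : Int × Int,
      cs.foldl (fun acc i => (acc.1 + (F i).1, acc.2 + (F i).2)) a
        = cs.foldl (fun acc i => (acc.1 + (G i).1, acc.2 + (G i).2)) a := by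
  induction cs with
  | nil => intro a; rfl
  | cons c cs ih =>
    intro a
    have hc := h c (by simp)
    simp only [List.foldl_cons, hc]
    exact ih (fun d hd => h d (by simp [hd])) _

lemma pvFoldlSum (F : Int → Int × Int) (cs : List Int) : ∀ a : Int × Int,
    cs.foldl (fun acc i => (acc.1 + (F i).1, acc.2 + (F i).2)) a
      = (a.1 + (cs.map (fun c => (F c).1)).sum, a.2 + (cs.map (fun c => (F c).2)).sum) := by
  induction cs with
  | nil => intro a; simp
  | cons c cs ih =>
    intro a
    simp only [List.foldl_cons, List.map_cons, List.sum_cons, ih]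
    simp [add_assoc]

-- A's result does not depend on the fuel, as long as it exceeds pvRank of the node
lemma pvStable (tree : List (Int × List Int)) (b_or_w : List String) (Rl : List Int)
    (Hcl : ∀ k ∈ Rl, ∀ c ∈ pvChildren tree k, c ∈ Rl)
    (Hrk : ∀ k ∈ Rl, ∀ c ∈ pvChildren tree k, pvRank tree c < pvRank tree k) :
    ∀ (N : Nat) (n : Int), n ∈ Rl → pvRank tree n < N →
      ∀ (f1 f2 : Nat), pvRank tree n < f1 → pvRank tree n < f2 →
      dfsF tree b_or_w f1 n = dfsF tree b_or_w f2 n := by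
  intro N
  induction N with
  | zero => intro n _ h; exact absurd h (Nat.not_lt_zero _)
  | succ N ih =>
    intro n hn hN f1 f2 h1 h2
    obtain ⟨g1, rfl⟩ : ∃ k, f1 = k + 1 := ⟨f1 - 1, by omega⟩
    obtain ⟨g2, rfl⟩ : ∃ k, f2 = k + 1 := ⟨f2 - 1, by omega⟩
    simp only [dfsF]
    have hcs : ∀ c ∈ ((PySem.Dict.mk tree).get? n).getD [],
        dfsF tree b_or_w g1 c = dfsF tree b_or_w g2 c := by
      intro c hc
      have hc' : c ∈ pvChildren tree n := hc
      have hcR := Hcl n hn c hc'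
      have hrk := Hrk n hn c hc'
      exact ih c hcR (by omega) g1 g2 (by omega) (by omega)
    rw [pvFoldlCongr (fun c => dfsF tree b_or_w g1 c) (fun c => dfsF tree b_or_w g2 c) _ hcs]

-- the defining recurrence of pvV
lemma pvV_eq (tree : List (Int × List Int)) (b_or_w : List String) (Rl : List Int)
    (Hcl : ∀ k ∈ Rl, ∀ c ∈ pvChildren tree k, c ∈ Rl)
    (Hrk : ∀ k ∈ Rl, ∀ c ∈ pvChildren tree k, pvRank tree c < pvRank tree k)
    (n : Int) (hn : n ∈ Rl) :
    pvV tree b_or_w n =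
      ((if PySem.List.pyGet? b_or_w (n - 1) = some "W" then (1 : Int) else -1)
          + ((((PySem.Dict.mk tree).get? n).getD []).map (fun c => (pvV tree b_or_w c).1)).sum,
        if ((if PySem.List.pyGet? b_or_w (n - 1) = some "W" then (1 : Int) else -1)
          + ((((PySem.Dict.mk tree).get? n).getD []).map (fun c => (pvV tree b_or_w c).1)).sum) = 0
        then ((((PySem.Dict.mk tree).get? n).getD []).map (fun c => (pvV tree b_or_w c).2)).sum + 1
        else ((((PySem.Dict.mk tree).get? n).getD []).map (fun c => (pvV tree b_or_w c).2)).sum) := by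
  show dfsF tree b_or_w (pvRank tree n + 1) n = _
  simp only [dfsF]
  have hcs : ∀ c ∈ ((PySem.Dict.mk tree).get? n).getD [],
      dfsF tree b_or_w (pvRank tree n) c = pvV tree b_or_w c := by
    intro c hc
    have hc' : c ∈ pvChildren tree n := hc
    have hcR := Hcl n hn c hc'
    have hrk := Hrk n hn c hc'
    exact pvStable tree b_or_w Rl Hcl Hrk (pvRank tree n) c hcR hrk
      (pvRank tree n) (pvRank tree c + 1) hrk (by omega)
  rw [pvFoldlCongr (fun c => dfsF tree b_or_w (pvRank tree n) c)
        (fun c => pvV tree b_or_w c) _ hcs,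
      pvFoldlSum (fun c => pvV tree b_or_w c)]
  simp

-- one machine step each, definitionally
lemma pvLoop_push (tree : List (Int × List Int)) (b_or_w : List String) (f : Nat)
    (n c : Int) (cs' : List Int) (x s : Int) (rest : List (Int × List Int × Int × Int)) :
    pvLoop tree b_or_w (f + 1) ((n, c :: cs', x, s) :: rest)
      = pvLoop tree b_or_w f (pvStart tree b_or_w c :: (n, cs', x, s) :: rest) := rfl

lemma pvLoop_ret (tree : List (Int × List Int)) (b_or_w : List String) (f : Nat)
    (n x s : Int) :
    pvLoop tree b_or_w (f + 1) [(n, ([] : List Int), x, s)]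
      = some (x, if x = 0 then s + 1 else s) := rfl

lemma pvLoop_merge (tree : List (Int × List Int)) (b_or_w : List String) (f : Nat)
    (n x s pn px ps : Int) (pcs : List Int) (rest : List (Int × List Int × Int × Int)) :
    pvLoop tree b_or_w (f + 1) ((n, ([] : List Int), x, s) :: (pn, pcs, px, ps) :: rest)
      = pvLoop tree b_or_w f ((pn, pcs, px + x, ps + (if x = 0 then s + 1 else s)) :: rest) := rfl

-- the maximal children-list length (bounds the machine's branching)
def pvL (tree : List (Int × List Int)) : Nat := (tree.map (fun p => p.2.length)).foldl max 0

lemma pvFuel_eq (tree : List (Int × List Int)) :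
    pvFuel tree = (pvL tree + 2) ^ (tree.length + 2) + 1 := rfl

-- "the machine processes the whole subtree of n in at most bnd steps and merges W n into the
-- frame below" — the simulation invariant of B's loop
def pvNodeRun (tree : List (Int × List Int)) (b_or_w : List String) (W : Int → Int × Int)
    (n : Int) (bnd : Nat) : Prop :=
  ∃ f, f ≤ bnd ∧ ∀ (g : Nat) (pn : Int) (pcs : List Int) (px ps : Int)
      (st : List (Int × List Int × Int × Int)),
    pvLoop tree b_or_w (f + g) (pvStart tree b_or_w n :: (pn, pcs, px, ps) :: st)
      = pvLoop tree b_or_w g ((pn, pcs, px + (W n).1, ps + (W n).2) :: st)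

lemma pvRunCs (tree : List (Int × List Int)) (b_or_w : List String) (W : Int → Int × Int)
    (bnd : Nat) :
    ∀ (cs : List Int), (∀ c ∈ cs, pvNodeRun tree b_or_w W c bnd) →
    ∃ f, f ≤ cs.length * (bnd + 1) ∧ ∀ (n x s : Int)
        (st : List (Int × List Int × Int × Int)) (g : Nat),
      pvLoop tree b_or_w (f + g) ((n, cs, x, s) :: st)
        = pvLoop tree b_or_w g ((n, ([] : List Int),
            x + (cs.map (fun c => (W c).1)).sum,
            s + (cs.map (fun c => (W c).2)).sum) :: st) := by
  intro cs
  induction cs with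
  | nil =>
    intro _
    exact ⟨0, by simp, fun n x s st g => by simp⟩
  | cons c cs ih =>
    intro h
    obtain ⟨fc, hfc, hc⟩ := h c (by simp)
    obtain ⟨f', hf', hcs⟩ := ih (fun d hd => h d (by simp [hd]))
    refine ⟨fc + f' + 1, ?_, fun n x s st g => ?_⟩
    · have hl : (c :: cs).length * (bnd + 1) = cs.length * (bnd + 1) + (bnd + 1) := by
        simp [List.length_cons]; ring
      omega
    · have e1 : fc + f' + 1 + g = (fc + (f' + g)) + 1 := by omega
      rw [e1, pvLoop_push, hc (f' + g) n cs x s st,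
          hcs n (x + (W c).1) (s + (W c).2) st g]
      simp [add_assoc]

lemma pvPowArith (L R cl f₁ : Nat) (hcl : cl ≤ L) (hf : f₁ ≤ cl * ((L + 2) ^ (R + 1) + 1)) :
    f₁ + 1 ≤ (L + 2) ^ (R + 1 + 1) := by
  have ht : L + 2 ≤ (L + 2) ^ (R + 1) := Nat.le_self_pow (by omega) _
  have h2 : (L + 2) ^ (R + 1 + 1) = (L + 2) * (L + 2) ^ (R + 1) := by ring
  have h3 : f₁ ≤ L * ((L + 2) ^ (R + 1) + 1) :=
    le_trans hf (Nat.mul_le_mul_right _ hcl)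
  rw [h2]
  nlinarith [ht, h3]

lemma pvRunNode (tree : List (Int × List Int)) (b_or_w : List String) (Rl : List Int)
    (Hkey : ∀ k ∈ Rl, ((PySem.Dict.mk tree).get? k).isSome = true)
    (Hcl : ∀ k ∈ Rl, ∀ c ∈ pvChildren tree k, c ∈ Rl)
    (Hrk : ∀ k ∈ Rl, ∀ c ∈ pvChildren tree k, pvRank tree c < pvRank tree k) :
    ∀ (N : Nat) (n : Int), n ∈ Rl → pvRank tree n < N →
      pvNodeRun tree b_or_w (pvV tree b_or_w) n ((pvL tree + 2) ^ (N + 1)) := by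
  intro N
  induction N with
  | zero => intro n _ h; exact absurd h (Nat.not_lt_zero _)
  | succ N ih =>
    intro n hn hN
    obtain ⟨cs, hget⟩ := Option.isSome_iff_exists.mp (Hkey n hn)
    have hmem : (n, cs) ∈ tree := PySem.Dict.mem_items_of_get?_eq_some _ hget
    have hchild : ∀ c ∈ cs, pvNodeRun tree b_or_w (pvV tree b_or_w) c ((pvL tree + 2) ^ (N + 1)) := by
      intro c hc
      have hc' : c ∈ pvChildren tree n := by simpa [pvChildren, hget] using hc
      have hrk := Hrk n hn c hc'
      exact ih c (Hcl n hn c hc') (by omega)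
    obtain ⟨f₁, hf₁, hrun⟩ := pvRunCs tree b_or_w (pvV tree b_or_w) _ cs hchild
    have hcl : cs.length ≤ pvL tree :=
      (PySem.List.le_foldl_max _ _).2 _ (List.mem_map.mpr ⟨(n, cs), hmem, rfl⟩)
    refine ⟨f₁ + 1, pvPowArith (pvL tree) N cs.length f₁ hcl hf₁, fun g pn pcs px ps st => ?_⟩
    have hstart : pvStart tree b_or_w n
        = (n, cs, (if PySem.List.pyGet? b_or_w (n - 1) = some "W" then (1 : Int) else -1), 0) := by
      simp [pvStart, hget]
    have e1 : f₁ + 1 + g = f₁ + (g + 1) := by omega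
    rw [hstart, e1,
        hrun n (if PySem.List.pyGet? b_or_w (n - 1) = some "W" then (1 : Int) else -1) 0
          ((pn, pcs, px, ps) :: st) (g + 1),
        pvLoop_merge, pvV_eq tree b_or_w Rl Hcl Hrk n hn, hget]
    simp

-- ===== VERDICT (by name: the statement is the Claim_ definition above) =====
theorem dfs_spec : Claim_equal_dfs := by
  unfold Claim_equal_dfs
  intro tree b_or_w node _ hpre
  unfold Spec_dfs
  unfold Pre_dfs at hpre
  have hnodeR : node ∈ pvReach tree node := pvMem_reach_self tree node
  have Hkey : ∀ k ∈ pvReach tree node, ((PySem.Dict.mk tree).get? k).isSome = true :=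
    fun k hk => (hpre k hk).1
  have Hmapf : ∀ k ∈ pvReach tree node, k ∈ tree.map Prod.fst :=
    fun k hk => pvMemKeys_of_isSome (Hkey k hk)
  have Cnode := pvReach_closed tree node Hmapf
  have Hcl : ∀ k ∈ pvReach tree node, ∀ c ∈ pvChildren tree k, c ∈ pvReach tree node :=
    fun k hk c hc => Cnode c (pvMemExpand_child hk hc)
  have HsubR : ∀ k ∈ pvReach tree node, ∀ y ∈ pvReach tree k, y ∈ pvReach tree node :=
    fun k hk => pvReach_subset_of_closed Cnode hk
  have Ck : ∀ k ∈ pvReach tree node, ∀ y ∈ pvExpand tree (pvReach tree k), y ∈ pvReach tree k :=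
    fun k hk => pvReach_closed tree k (fun x hx => Hmapf x (HsubR k hk x hx))
  have Hrk : ∀ k ∈ pvReach tree node, ∀ c ∈ pvChildren tree k, pvRank tree c < pvRank tree k := by
    intro k hk c hc
    have hck : c ∈ pvReach tree k := Ck k hk c (pvMemExpand_child (pvMem_reach_self tree k) hc)
    have hsub : ∀ y ∈ pvReach tree c, y ∈ pvReach tree k :=
      pvReach_subset_of_closed (Ck k hk) hck
    have hknotin : k ∉ pvReach tree c := by
      intro hkin
      exact (hpre k hk).2.2 (List.mem_flatMap.mpr ⟨c, hc, hkin⟩)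
    unfold pvRank
    apply Finset.card_lt_card
    rw [Finset.ssubset_iff_subset_ne]
    constructor
    · intro x hx
      rw [List.mem_toFinset] at hx ⊢
      exact hsub x hx
    · intro heq
      apply hknotin
      have hkk : k ∈ (pvReach tree k).toFinset := List.mem_toFinset.mpr (pvMem_reach_self tree k)
      rw [← heq] at hkk
      exact List.mem_toFinset.mp hkk
  have Hrb : ∀ k ∈ pvReach tree node, pvRank tree k ≤ tree.length := by
    intro k hk
    unfold pvRank
    have hsub : (pvReach tree k).toFinset ⊆ (tree.map Prod.fst).toFinset := by
      intro x hx
      rw [List.mem_toFinset] at hx ⊢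
      exact Hmapf x (HsubR k hk x hx)
    calc (pvReach tree k).toFinset.card
        ≤ (tree.map Prod.fst).toFinset.card := Finset.card_le_card hsub
      _ ≤ (tree.map Prod.fst).length := List.toFinset_card_le _
      _ = tree.length := by simp
  have hrbn := Hrb node hnodeR
  have hA : dfs tree b_or_w node = pvV tree b_or_w node :=
    pvStable tree b_or_w (pvReach tree node) Hcl Hrk (pvRank tree node + 1) node hnodeR
      (by omega) (tree.length + 1) (pvRank tree node + 1) (by omega) (by omega)
  obtain ⟨cs, hget⟩ := Option.isSome_iff_exists.mp (Hkey node hnodeR)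
  have hmem : (node, cs) ∈ tree := PySem.Dict.mem_items_of_get?_eq_some _ hget
  have hchild : ∀ c ∈ cs,
      pvNodeRun tree b_or_w (pvV tree b_or_w) c ((pvL tree + 2) ^ (tree.length + 1)) := by
    intro c hc
    have hc' : c ∈ pvChildren tree node := by simpa [pvChildren, hget] using hc
    have hrk := Hrk node hnodeR c hc'
    exact pvRunNode tree b_or_w (pvReach tree node) Hkey Hcl Hrk tree.length c
      (Hcl node hnodeR c hc') (by omega)
  obtain ⟨f₁, hf₁, hrun⟩ := pvRunCs tree b_or_w (pvV tree b_or_w) _ cs hchild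
  have hcl : cs.length ≤ pvL tree :=
    (PySem.List.le_foldl_max _ _).2 _ (List.mem_map.mpr ⟨(node, cs), hmem, rfl⟩)
  have harr : f₁ + 1 ≤ (pvL tree + 2) ^ (tree.length + 1 + 1) :=
    pvPowArith (pvL tree) tree.length cs.length f₁ hcl hf₁
  have harr' : f₁ + 1 ≤ (pvL tree + 2) ^ (tree.length + 2) := by
    rw [show tree.length + 2 = tree.length + 1 + 1 from by omega]
    exact harr
  have hB : dfs_alt tree b_or_w node = pvV tree b_or_w node := by
    unfold dfs_alt
    rw [pvFuel_eq]
    have hstart : pvStart tree b_or_w node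
        = (node, cs, (if PySem.List.pyGet? b_or_w (node - 1) = some "W" then (1 : Int) else -1), 0) := by
      simp [pvStart, hget]
    have e1 : (pvL tree + 2) ^ (tree.length + 2) + 1
        = f₁ + ((((pvL tree + 2) ^ (tree.length + 2) + 1) - f₁ - 1) + 1) := by omega
    rw [hstart, e1,
        hrun node (if PySem.List.pyGet? b_or_w (node - 1) = some "W" then (1 : Int) else -1) 0
          [] ((((pvL tree + 2) ^ (tree.length + 2) + 1) - f₁ - 1) + 1),
        pvLoop_ret, pvV_eq tree b_or_w (pvReach tree node) Hcl Hrk node hnodeR, hget]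
    simp
  rw [hA, hB]
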